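-- pv_equiv track=rewrite | github.com/chaeminsoo/coding_test | word_puzzle.py | solution
-- ===== SOURCE A (Python) =====
-- def solution(strs, t):
--     n = len(t)
--     dp = [1e9]*(n+1)
--     dp[n] = 0
--     for i in range(n-1,-1,-1):
--         for j in range(1,6):
--             if i+j > n:
--                 break
--             if t[i:i+j] in strs:
--                 dp[i] = min(dp[i],dp[i+j]+1)
--     if dp[0] == 1e9:
--         return -1
--     else:
--         return dp[0]
-- ===== SOURCE B (Python) =====
-- def solution(strs, t):
--     n = len(t)
--     frontier = {0}
--     visited = {0}
--     for d in range(n + 1):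
--         if n in frontier:
--             return d
--         nxt = set()
--         for k in frontier:
--             for j in range(1, 6):
--                 if k + j <= n and t[k:k+j] in strs:
--                     if k + j not in visited:
--                         nxt.add(k + j)
--         visited |= nxt
--         frontier = nxt
--     return -1
-- ===== Notes on version B (the rewrite author's own statement) =====
-- stated objective: alternative
-- what changed: Replaces the backward dp-array relaxation (dp[i] = min over word lengths of dp[i+j]+1 for all positions i) by a forward breadth-first search over positions 0..n with an explicit frontier/visited set, returning the BFS layer at which position n is first reached; it stops as soon as n is reached and only explores positions actually reachable from 0.
import Mathlib
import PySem

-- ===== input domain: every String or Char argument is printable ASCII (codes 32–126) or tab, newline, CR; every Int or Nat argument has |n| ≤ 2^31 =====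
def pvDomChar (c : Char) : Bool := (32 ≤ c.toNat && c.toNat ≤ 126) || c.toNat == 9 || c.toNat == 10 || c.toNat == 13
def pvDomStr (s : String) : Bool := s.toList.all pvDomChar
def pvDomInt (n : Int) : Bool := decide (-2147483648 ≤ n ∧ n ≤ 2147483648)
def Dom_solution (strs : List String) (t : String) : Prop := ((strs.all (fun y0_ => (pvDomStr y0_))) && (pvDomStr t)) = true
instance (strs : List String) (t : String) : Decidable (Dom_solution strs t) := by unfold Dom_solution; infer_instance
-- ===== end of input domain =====

-- B replaces A's backward dp-array relaxation by a forward layer-by-layer BFS over positions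
-- with an explicit frontier/visited set (alternative algorithm; early exit, explores only reachable positions).

-- ===== PORT A =====
-- inner 'for j in range(1,6)' loop of A, with its 'break' when i+j > n
def solutionInner (strs : List String) (t : String) (n i : Int) :
    List Int → List Int → List Int
  | [], dp => dp
  | j :: js, dp =>
    if i + j > n then dp   -- break
    else
      let dp' := if strs.contains (PySem.Str.slice t (some i) (some (i + j)))
        then PySem.List.pySetD dp i
               (min (PySem.List.pyGetD dp i 0) (PySem.List.pyGetD dp (i + j) 0 + 1))
        else dp
      solutionInner strs t n i js dp'

-- Python's 1e9 float sentinel is ported as the integer 10^9: exact, since 1e9 is an exactly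
-- representable float equal to 10^9 and every other dp entry is an integer.
def solution (strs : List String) (t : String) : Int :=
  let n : Int := PySem.Str.len t
  let dp : List Int := PySem.List.pyRepeat [1000000000] (n + 1)
  let dp := PySem.List.pySetD dp n 0
  let dp := (PySem.List.pyRange (n - 1) (-1) (-1)).foldl
    (fun dp i => solutionInner strs t n i (PySem.List.pyRange 1 6 1) dp) dp
  if PySem.List.pyGetD dp 0 0 = 1000000000 then -1 else PySem.List.pyGetD dp 0 0

-- ===== PORT B =====
-- one BFS layer: successors of the frontier not yet visited
def bfsStep (strs : List String) (t : String) (n : Int)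
    (frontier visited : PySem.Set Int) : PySem.Set Int :=
  frontier.foldl (fun nxt k =>
    (PySem.List.pyRange 1 6 1).foldl (fun nxt j =>
      if k + j ≤ n ∧ strs.contains (PySem.Str.slice t (some k) (some (k + j))) then
        (if (k + j) ∈ visited then nxt else PySem.Set.add nxt (k + j))
      else nxt) nxt) PySem.Set.empty

-- the 'for d in range(n+1)' loop with its 'return d' early exit; fuel = remaining iterations
def bfsLoop (strs : List String) (t : String) (n : Int) :
    Nat → PySem.Set Int → PySem.Set Int → Int → Int
  | 0, _, _, _ => -1
  | fuel + 1, frontier, visited, d =>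
    if n ∈ frontier then d
    else
      let nxt := bfsStep strs t n frontier visited
      bfsLoop strs t n fuel nxt (PySem.Set.union visited nxt) (d + 1)

def solution_alt (strs : List String) (t : String) : Int :=
  let n : Int := PySem.Str.len t
  bfsLoop strs t n (n + 1).toNat (PySem.Set.ofList [0]) (PySem.Set.ofList [0]) 0

-- ===== PRECONDITION & SPEC =====
-- Pre_ excludes strings of length ≥ 10^9: there A's 1e9 float sentinel is no longer above every
-- genuine answer (a shortest tiling can need ≥ 10^9 words, which A silently reports as -1), and
-- A's allocation of the 10^9-entry dp list raises MemoryError in practice.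
def Pre_solution (strs : List String) (t : String) : Prop :=
  PySem.Str.len t < 1000000000
instance (strs : List String) (t : String) : Decidable (Pre_solution strs t) := by
  unfold Pre_solution; infer_instance

def pvWitness_solution : List String × String := (["ab", "c"], "abc")

def Spec_solution (strs : List String) (t : String) (out : Int) : Prop := out = solution_alt strs t
instance (strs : List String) (t : String) (out : Int) : Decidable (Spec_solution strs t out) := by unfold Spec_solution; infer_instance

-- ===== CLAIM (what is proved, stated in full; the proofs are below) =====
def Claim_equal_solution : Prop := ∀ (strs : List String) (t : String), Dom_solution strs t → Pre_solution strs t → Spec_solution strs t (solution strs t)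

-- ===== LEMMAS AND PROOFS =====

-- a chain of d words tiling t[a:b]: W k j says the word t[k:k+j] is usable (j ∈ 1..5, k+j ≤ n)
inductive Ch (W : Int → Int → Bool) (n : Int) : Int → Int → Nat → Prop
  | refl (a : Int) : Ch W n a a 0
  | step {a c : Int} {d : Nat} (j : Int) (h1 : 1 ≤ j) (h5 : j ≤ 5) (hn : a + j ≤ n)
      (hw : W a j = true) (tl : Ch W n (a + j) c d) : Ch W n a c (d + 1)

def Reach (W : Int → Int → Bool) (n a b : Int) : Prop := ∃ d, Ch W n a b d

noncomputable def mu (W : Int → Int → Bool) (n a b : Int) : Nat :=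
  sInf {d | Ch W n a b d}

-- the word-membership test both programs use
def Wtest (strs : List String) (t : String) (k j : Int) : Bool :=
  strs.contains (PySem.Str.slice t (some k) (some (k + j)))

-- the common value of both programs: least number of words tiling all of t, or -1
noncomputable def Ans (W : Int → Int → Bool) (n : Int) : Int :=
  @ite _ (Reach W n 0 n) (Classical.propDecidable _) ((mu W n 0 n : Int)) (-1)

lemma ch_zero {W : Int → Int → Bool} {n a b : Int} (h : Ch W n a b 0) : a = b := by
  cases h; rfl

lemma ch_le {W : Int → Int → Bool} {n a b : Int} {d : Nat} (h : Ch W n a b d) :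
    a ≤ b ∧ (d : Int) ≤ b - a := by
  induction h with
  | refl a => simp
  | step j h1 h5 hn hw tl ih => push_cast; omega

lemma ch_snoc {W : Int → Int → Bool} {n a c : Int} {d : Nat} (h : Ch W n a c d) {j : Int}
    (h1 : 1 ≤ j) (h5 : j ≤ 5) (hn : c + j ≤ n) (hw : W c j = true) :
    Ch W n a (c + j) (d + 1) := by
  induction h with
  | refl a => exact Ch.step j h1 h5 hn hw (Ch.refl _)
  | step j' p1 p5 pn pw tl ih => exact Ch.step j' p1 p5 pn pw (ih hn hw)

lemma ch_snoc_elim {W : Int → Int → Bool} {n : Int} {a b : Int} {d : Nat}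
    (h : Ch W n a b (d + 1)) :
    ∃ c j, Ch W n a c d ∧ 1 ≤ j ∧ j ≤ 5 ∧ c + j ≤ n ∧ W c j = true ∧ b = c + j := by
  induction d generalizing a with
  | zero =>
    cases h with
    | step j h1 h5 hn hw tl => exact ⟨a, j, Ch.refl a, h1, h5, hn, hw, (ch_zero tl).symm⟩
  | succ e ih =>
    cases h with
    | step j h1 h5 hn hw tl =>
      obtain ⟨c, j', hc, q1, q5, qn, qw, rfl⟩ := ih tl
      exact ⟨c, j', Ch.step j h1 h5 hn hw hc, q1, q5, qn, qw, rfl⟩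

lemma mu_le {W : Int → Int → Bool} {n a b : Int} {d : Nat} (h : Ch W n a b d) :
    mu W n a b ≤ d := Nat.sInf_le h

lemma ch_mu {W : Int → Int → Bool} {n a b : Int} (h : Reach W n a b) :
    Ch W n a b (mu W n a b) := Nat.sInf_mem h

lemma mu_self (W : Int → Int → Bool) (n a : Int) : mu W n a a = 0 :=
  Nat.le_zero.mp (mu_le (Ch.refl a))

lemma Ans_pos {W : Int → Int → Bool} {n : Int} (h : Reach W n 0 n) :
    Ans W n = (mu W n 0 n : Int) := if_pos h

lemma Ans_neg {W : Int → Int → Bool} {n : Int} (h : ¬ Reach W n 0 n) :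
    Ans W n = -1 := if_neg h

-- ---------- A side ----------

-- value dp[i] ends up with: least number of words tiling t[i:], 10^9 if impossible
noncomputable def Vv (W : Int → Int → Bool) (n i : Int) : Int :=
  @ite _ (Reach W n i n) (Classical.propDecidable _) ((mu W n i n : Int)) 1000000000

lemma Vv_pos {W : Int → Int → Bool} {n i : Int} (h : Reach W n i n) :
    Vv W n i = (mu W n i n : Int) := if_pos h

lemma Vv_neg {W : Int → Int → Bool} {n i : Int} (h : ¬ Reach W n i n) :
    Vv W n i = 1000000000 := if_neg h

-- the guarded running-min loop, abstracted
def gmin (P : Int → Prop) [DecidablePred P] (v : Int → Int) (js : List Int) (a : Int) : Int :=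
  js.foldl (fun acc j => if P j then min acc (v j) else acc) a

lemma gmin_nil (P : Int → Prop) [DecidablePred P] (v : Int → Int) (a : Int) :
    gmin P v [] a = a := rfl

lemma gmin_cons (P : Int → Prop) [DecidablePred P] (v : Int → Int) (j : Int) (js : List Int)
    (a : Int) : gmin P v (j :: js) a = gmin P v js (if P j then min a (v j) else a) := rfl

lemma gmin_le_init (P : Int → Prop) [DecidablePred P] (v : Int → Int) :
    ∀ (js : List Int) (a : Int), gmin P v js a ≤ a := by
  intro js
  induction js with
  | nil => intro a; simp [gmin_nil]
  | cons j js ih =>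
    intro a
    rw [gmin_cons]
    split_ifs with h
    · exact le_trans (ih _) (min_le_left _ _)
    · exact ih a

lemma gmin_le_val (P : Int → Prop) [DecidablePred P] (v : Int → Int) :
    ∀ (js : List Int) (a : Int) (j : Int), j ∈ js → P j → gmin P v js a ≤ v j := by
  intro js
  induction js with
  | nil => intro a j hj; simp at hj
  | cons j' js ih =>
    intro a j hj hP
    rw [gmin_cons]
    rcases List.mem_cons.mp hj with rfl | hj
    · simp only [if_pos hP]
      exact le_trans (gmin_le_init _ _ _ _) (min_le_right _ _)
    · exact ih _ j hj hP

lemma gmin_cases (P : Int → Prop) [DecidablePred P] (v : Int → Int) :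
    ∀ (js : List Int) (a : Int),
      gmin P v js a = a ∨ ∃ j ∈ js, P j ∧ gmin P v js a = v j := by
  intro js
  induction js with
  | nil => intro a; left; rfl
  | cons j js ih =>
    intro a
    rw [gmin_cons]
    split_ifs with h
    · rcases ih (min a (v j)) with heq | ⟨j', hj', hP', heq⟩
      · rcases min_cases a (v j) with ⟨hm, _⟩ | ⟨hm, _⟩
        · left; rw [heq, hm]
        · right; exact ⟨j, List.mem_cons_self .., h, by rw [heq, hm]⟩
      · right; exact ⟨j', List.mem_cons_of_mem _ hj', hP', heq⟩
    · rcases ih a with heq | ⟨j', hj', hP', heq⟩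
      · left; exact heq
      · right; exact ⟨j', List.mem_cons_of_mem _ hj', hP', heq⟩

lemma gmin_of_forall_not (P : Int → Prop) [DecidablePred P] (v : Int → Int)
    (js : List Int) (a : Int) (h : ∀ j ∈ js, ¬ P j) : gmin P v js a = a := by
  induction js with
  | nil => rfl
  | cons j js ih =>
    rw [gmin_cons, if_neg (h j (List.mem_cons_self ..))]
    exact ih fun j' hj' => h j' (List.mem_cons_of_mem _ hj')

-- the DP recurrence: the guarded running min over j = 1..5 computes Vv i
lemma gmin_eq_V (W : Int → Int → Bool) (n i : Int) (hi0 : 0 ≤ i) (hin : i < n)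
    (hn9 : n < 1000000000) :
    gmin (fun j => i + j ≤ n ∧ W i j = true) (fun j => Vv W n (i + j) + 1)
      [1, 2, 3, 4, 5] 1000000000 = Vv W n i := by
  by_cases hr : Reach W n i n
  · rw [Vv_pos hr]
    have hch := ch_mu hr
    have hb : (mu W n i n : Int) ≤ n - i := (ch_le hch).2
    have hd0 : mu W n i n ≠ 0 := fun h0 => absurd (ch_zero (h0 ▸ hch)) (by omega)
    obtain ⟨e, he⟩ : ∃ e, mu W n i n = e + 1 := ⟨mu W n i n - 1, by omega⟩
    rw [he] at hch
    cases hch with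
    | step j h1 h5 hn5 hw tl =>
      have hrj : Reach W n (i + j) n := ⟨e, tl⟩
      have hjmem : j ∈ ([1, 2, 3, 4, 5] : List Int) := by
        simp only [List.mem_cons]; omega
      have hvj : Vv W n (i + j) + 1 = (mu W n i n : Int) := by
        have q1 : mu W n (i + j) n ≤ e := mu_le tl
        have q2 : mu W n i n ≤ mu W n (i + j) n + 1 :=
          mu_le (Ch.step j h1 h5 hn5 hw (ch_mu hrj))
        rw [Vv_pos hrj]
        omega
      have hub : gmin (fun j => i + j ≤ n ∧ W i j = true)
          (fun j => Vv W n (i + j) + 1) [1, 2, 3, 4, 5] 1000000000 ≤ (mu W n i n : Int) := by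
        have h := gmin_le_val (fun j => i + j ≤ n ∧ W i j = true)
          (fun j => Vv W n (i + j) + 1) [1, 2, 3, 4, 5] 1000000000 j hjmem ⟨hn5, hw⟩
        simp only at h
        rwa [hvj] at h
      have hlow : ∀ j' ∈ ([1, 2, 3, 4, 5] : List Int), (i + j' ≤ n ∧ W i j' = true) →
          (mu W n i n : Int) ≤ Vv W n (i + j') + 1 := by
        intro j' hj' hPj'
        have h1' : (1 : Int) ≤ j' ∧ j' ≤ 5 := by
          simp only [List.mem_cons, List.not_mem_nil, or_false] at hj'; omega
        by_cases hrj' : Reach W n (i + j') n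
        · have q2 : mu W n i n ≤ mu W n (i + j') n + 1 :=
            mu_le (Ch.step j' h1'.1 h1'.2 hPj'.1 hPj'.2 (ch_mu hrj'))
          rw [Vv_pos hrj']
          omega
        · rw [Vv_neg hrj']
          omega
      rcases gmin_cases (fun j => i + j ≤ n ∧ W i j = true)
          (fun j => Vv W n (i + j) + 1) [1, 2, 3, 4, 5] 1000000000 with heq | ⟨j', hj', hP', heq⟩
      · omega
      · have hl := hlow j' hj' hP'
        omega
  · rw [Vv_neg hr]
    have hub := gmin_le_init (fun j => i + j ≤ n ∧ W i j = true)
      (fun j => Vv W n (i + j) + 1) [1, 2, 3, 4, 5] 1000000000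
    rcases gmin_cases (fun j => i + j ≤ n ∧ W i j = true)
        (fun j => Vv W n (i + j) + 1) [1, 2, 3, 4, 5] 1000000000 with heq | ⟨j', hj', hP', heq⟩
    · exact heq
    · have h1' : (1 : Int) ≤ j' ∧ j' ≤ 5 := by
        simp only [List.mem_cons, List.not_mem_nil, or_false] at hj'; omega
      have hrj' : ¬ Reach W n (i + j') n := by
        rintro ⟨dd, hc⟩
        exact hr ⟨dd + 1, Ch.step j' h1'.1 h1'.2 hP'.1 hP'.2 hc⟩
      rw [Vv_neg hrj'] at heq
      omega

-- indexing through a pySetD write (both indices in range)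
lemma getD_setD (dp : List Int) {i k : Int} (v : Int) (hi0 : 0 ≤ i) (hk0 : 0 ≤ k)
    (hk : k.toNat < dp.length) (hi : i.toNat < dp.length) :
    PySem.List.pyGetD (PySem.List.pySetD dp i v) k 0 =
      if k = i then v else PySem.List.pyGetD dp k 0 := by
  rw [PySem.List.pySetD_of_nonneg dp v hi0]
  rw [PySem.List.pyGetD_eq_getElem _ _ hk0 (by simp; omega)]
  rw [PySem.List.pyGetD_eq_getElem _ _ hk0 (by omega : k < (dp.length : Int))]
  rw [List.getElem_set]
  by_cases hik : k = i
  · simp [hik]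
  · rw [if_neg (by omega : ¬ i.toNat = k.toNat), if_neg hik]

-- the loop invariant for A's outer loop
def Sinv (strs : List String) (t : String) (i : Int) (dp : List Int) : Prop :=
  dp.length = (PySem.Str.len t + 1).toNat ∧
  (∀ k : Int, 0 ≤ k → k < i → PySem.List.pyGetD dp k 0 = 1000000000) ∧
  (∀ k : Int, i ≤ k → k ≤ PySem.Str.len t →
    PySem.List.pyGetD dp k 0 = Vv (Wtest strs t) (PySem.Str.len t) k)

-- running A's inner loop replaces dp[i] by the guarded running min
lemma inner_run (strs : List String) (t : String) (i : Int)
    (hi0 : 0 ≤ i) (hin : i < PySem.Str.len t) :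
    ∀ (js : List Int), js.Pairwise (· ≤ ·) → (∀ j ∈ js, 1 ≤ j) →
    ∀ (dp : List Int) (acc : Int), dp.length = (PySem.Str.len t + 1).toNat →
      PySem.List.pyGetD dp i 0 = acc →
      (∀ k : Int, i < k → k ≤ PySem.Str.len t →
        PySem.List.pyGetD dp k 0 = Vv (Wtest strs t) (PySem.Str.len t) k) →
      solutionInner strs t (PySem.Str.len t) i js dp =
        PySem.List.pySetD dp i
          (gmin (fun j => i + j ≤ PySem.Str.len t ∧ Wtest strs t i j = true)
            (fun j => Vv (Wtest strs t) (PySem.Str.len t) (i + j) + 1) js acc) := by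
  intro js
  induction js with
  | nil =>
    intro _ _ dp acc hlen hcur _
    rw [gmin_nil, solutionInner, ← hcur, PySem.List.pySetD_of_nonneg _ _ hi0,
      PySem.List.pyGetD_eq_getElem _ _ hi0 (by rw [hlen]; omega)]
    exact (List.set_getElem_self _).symm
  | cons j js ih =>
    intro hpw h1 dp acc hlen hcur hup
    have hpw' := (List.pairwise_cons.mp hpw)
    have h1j : (1 : Int) ≤ j := h1 j (List.mem_cons_self ..)
    rw [solutionInner]
    by_cases hbr : i + j > PySem.Str.len t
    · rw [if_pos hbr]
      have hnone : ∀ j' ∈ j :: js,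
          ¬ (i + j' ≤ PySem.Str.len t ∧ Wtest strs t i j' = true) := by
        intro j' hj'
        rcases List.mem_cons.mp hj' with rfl | hj'
        · exact fun h => absurd h.1 (by omega)
        · have := hpw'.1 j' hj'
          exact fun h => absurd h.1 (by omega)
      rw [gmin_of_forall_not _ _ _ _ hnone, ← hcur, PySem.List.pySetD_of_nonneg _ _ hi0,
        PySem.List.pyGetD_eq_getElem _ _ hi0 (by rw [hlen]; omega)]
      exact (List.set_getElem_self _).symm
    · rw [if_neg hbr]
      have hij : i + j ≤ PySem.Str.len t := by omega
      rw [gmin_cons]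
      by_cases hw : Wtest strs t i j = true
      · have hif : strs.contains (PySem.Str.slice t (some i) (some (i + j))) = true := hw
        simp only [hif, if_true]
        have hread : PySem.List.pyGetD dp (i + j) 0 =
            Vv (Wtest strs t) (PySem.Str.len t) (i + j) := hup (i + j) (by omega) hij
        have hguard : (i + j ≤ PySem.Str.len t ∧ Wtest strs t i j = true) := ⟨hij, hw⟩
        rw [if_pos hguard]
        have hilen : i.toNat < dp.length := by rw [hlen]; omega
        have := ih hpw'.2 (fun j' hj' => h1 j' (List.mem_cons_of_mem _ hj'))
          (PySem.List.pySetD dp i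
            (min (PySem.List.pyGetD dp i 0) (PySem.List.pyGetD dp (i + j) 0 + 1)))
          (min acc (Vv (Wtest strs t) (PySem.Str.len t) (i + j) + 1))
          (by rw [PySem.List.length_pySetD, hlen])
          (by rw [getD_setD dp _ hi0 hi0 hilen hilen, if_pos rfl, hcur, hread])
          (by
            intro k hk1 hk2
            rw [getD_setD dp _ hi0 (by omega) (by rw [hlen]; omega) hilen,
              if_neg (by omega : ¬ k = i)]
            exact hup k hk1 hk2)
        rw [this, PySem.List.pySetD_of_nonneg _ _ hi0, PySem.List.pySetD_of_nonneg _ _ hi0,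
          PySem.List.pySetD_of_nonneg _ _ hi0, List.set_set]
      · have hif : strs.contains (PySem.Str.slice t (some i) (some (i + j))) = false := by
          cases hq : Wtest strs t i j
          · exact hq
          · exact absurd hq hw
        simp only [hif, Bool.false_eq_true, if_false]
        rw [if_neg (by exact fun h => hw h.2)]
        exact ih hpw'.2 (fun j' hj' => h1 j' (List.mem_cons_of_mem _ hj')) dp acc hlen hcur hup

-- one outer-loop step preserves the invariant, filling slot i with Vv i
lemma step_inv (strs : List String) (t : String) (hpre : PySem.Str.len t < 1000000000)
    (i : Int) (hi0 : 0 ≤ i) (hin : i < PySem.Str.len t) (dp : List Int)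
    (h : Sinv strs t (i + 1) dp) :
    Sinv strs t i (solutionInner strs t (PySem.Str.len t) i (PySem.List.pyRange 1 6 1) dp) := by
  obtain ⟨hlen, hlo, hhi⟩ := h
  have hrange : PySem.List.pyRange 1 6 1 = [1, 2, 3, 4, 5] := by decide
  have hcur : PySem.List.pyGetD dp i 0 = 1000000000 := hlo i hi0 (by omega)
  have hrun := inner_run strs t i hi0 hin [1, 2, 3, 4, 5] (by decide) (by decide)
    dp 1000000000 hlen hcur (fun k hk1 hk2 => hhi k (by omega) hk2)
  rw [hrange, hrun, gmin_eq_V (Wtest strs t) (PySem.Str.len t) i hi0 hin hpre]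
  have hilen : i.toNat < dp.length := by rw [hlen]; omega
  refine ⟨by rw [PySem.List.length_pySetD, hlen], ?_, ?_⟩
  · intro k hk0 hki
    rw [getD_setD dp _ hi0 hk0 (by rw [hlen]; omega) hilen, if_neg (by omega : ¬ k = i)]
    exact hlo k hk0 (by omega)
  · intro k hk1 hk2
    by_cases hk : k = i
    · rw [getD_setD dp _ hi0 (by omega) (by rw [hlen]; omega) hilen, if_pos hk, hk]
    · rw [getD_setD dp _ hi0 (by omega) (by rw [hlen]; omega) hilen, if_neg hk]
      exact hhi k (by omega) hk2

-- the whole outer loop, by induction on the countdown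
lemma outer_loop (strs : List String) (t : String) (hpre : PySem.Str.len t < 1000000000) :
    ∀ (m : Nat) (dp : List Int), (m : Int) ≤ PySem.Str.len t → Sinv strs t (m : Int) dp →
      Sinv strs t 0 (((PySem.List.pyRange ((m : Int) - 1) (-1) (-1)).foldl
        (fun dp i => solutionInner strs t (PySem.Str.len t) i (PySem.List.pyRange 1 6 1) dp)
        dp)) := by
  intro m
  induction m with
  | zero =>
    intro dp _ hinv
    rw [PySem.List.pyRange_neg_one_eq_nil (by omega)]
    exact hinv
  | succ m ih =>
    intro dp hm hinv
    have hcons : PySem.List.pyRange (((m : Nat) + 1 : Int) - 1) (-1) (-1) =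
        ((m : Nat) : Int) :: PySem.List.pyRange (((m : Nat) : Int) - 1) (-1) (-1) := by
      rw [PySem.List.pyRange_neg_one_cons (by omega)]
      ring_nf
    rw [show (((m + 1 : Nat) : Int) - 1) = (((m : Nat) + 1 : Int) - 1) by push_cast; ring, hcons]
    rw [List.foldl_cons]
    exact ih _ (by push_cast at hm ⊢; omega)
      (step_inv strs t hpre _ (by positivity) (by push_cast at hm ⊢; omega) dp
        (by rw [show ((m : Nat) : Int) + 1 = ((m + 1 : Nat) : Int) by push_cast; ring]; exact hinv))

-- A computes Ans
lemma solution_eq (strs : List String) (t : String) (hpre : PySem.Str.len t < 1000000000) :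
    solution strs t = Ans (Wtest strs t) (PySem.Str.len t) := by
  have hn0 : 0 ≤ PySem.Str.len t := by rw [PySem.Str.len_eq]; positivity
  -- the initial dp satisfies the invariant at i = n
  have hinit : Sinv strs t (PySem.Str.len t)
      (PySem.List.pySetD (PySem.List.pyRepeat [1000000000] (PySem.Str.len t + 1))
        (PySem.Str.len t) 0) := by
    have hrep : PySem.List.pyRepeat ([1000000000] : List Int) (PySem.Str.len t + 1) =
        List.replicate (PySem.Str.len t + 1).toNat 1000000000 :=
      PySem.List.pyRepeat_singleton _ _
    have hlenr : (List.replicate (PySem.Str.len t + 1).toNat (1000000000 : Int)).length =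
        (PySem.Str.len t + 1).toNat := List.length_replicate
    have hread : ∀ k : Int, 0 ≤ k → k ≤ PySem.Str.len t →
        PySem.List.pyGetD (List.replicate (PySem.Str.len t + 1).toNat (1000000000 : Int)) k 0 =
          1000000000 := by
      intro k hk0 hk1
      rw [PySem.List.pyGetD_eq_getElem _ _ hk0 (by rw [hlenr]; omega)]
      exact List.getElem_replicate _
    refine ⟨by rw [hrep, PySem.List.length_pySetD, hlenr], ?_, ?_⟩
    · intro k hk0 hkn
      rw [hrep, getD_setD _ _ hn0 hk0 (by rw [hlenr]; omega) (by rw [hlenr]; omega),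
        if_neg (by omega : ¬ k = PySem.Str.len t)]
      exact hread k hk0 (by omega)
    · intro k hk1 hk2
      have hk : k = PySem.Str.len t := by omega
      rw [hk, hrep, getD_setD _ _ hn0 hn0 (by rw [hlenr]; omega) (by rw [hlenr]; omega),
        if_pos rfl]
      have hre : Reach (Wtest strs t) (PySem.Str.len t) (PySem.Str.len t) (PySem.Str.len t) :=
        ⟨0, Ch.refl _⟩
      rw [Vv_pos hre, mu_self]
      simp
  have hfin := outer_loop strs t hpre (PySem.Str.len t).toNat _
    (by omega) (by rwa [Int.toNat_of_nonneg hn0])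
  rw [Int.toNat_of_nonneg hn0] at hfin
  obtain ⟨_, _, hval⟩ := hfin
  have hdp0 := hval 0 le_rfl hn0
  show (if PySem.List.pyGetD _ 0 0 = 1000000000 then (-1 : Int) else PySem.List.pyGetD _ 0 0) = _
  rw [hdp0]
  by_cases hr : Reach (Wtest strs t) (PySem.Str.len t) 0 (PySem.Str.len t)
  · have hb := (ch_le (ch_mu hr)).2
    rw [Vv_pos hr, Ans_pos hr, if_neg (by omega)]
  · rw [Vv_neg hr, Ans_neg hr, if_pos rfl]

-- ---------- B side ----------

-- membership in the inner successor fold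
lemma mem_inner_fold (strs : List String) (t : String) (n : Int) (visited : PySem.Set Int)
    (k : Int) :
    ∀ (js : List Int) (s : PySem.Set Int) (x : Int),
      x ∈ js.foldl (fun nxt j =>
          if k + j ≤ n ∧ strs.contains (PySem.Str.slice t (some k) (some (k + j))) then
            (if (k + j) ∈ visited then nxt else PySem.Set.add nxt (k + j))
          else nxt) s ↔
        x ∈ s ∨ ∃ j ∈ js, (k + j ≤ n ∧ Wtest strs t k j = true) ∧ x = k + j ∧ x ∉ visited := by
  intro js
  induction js with
  | nil => intro s x; simp
  | cons j js ih =>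
    intro s x
    rw [List.foldl_cons]
    by_cases hg : k + j ≤ n ∧ strs.contains (PySem.Str.slice t (some k) (some (k + j))) = true
    · rw [if_pos hg]
      by_cases hv : (k + j) ∈ visited
      · rw [if_pos hv, ih]
        constructor
        · rintro (hx | hx)
          · exact Or.inl hx
          · exact Or.inr (by obtain ⟨j', hj', hq⟩ := hx; exact ⟨j', List.mem_cons_of_mem _ hj', hq⟩)
        · rintro (hx | ⟨j', hj', hq, rfl, hnv⟩)
          · exact Or.inl hx
          · rcases List.mem_cons.mp hj' with rfl | hj'
            · exact absurd hv hnv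
            · exact Or.inr ⟨j', hj', hq, rfl, hnv⟩
      · rw [if_neg hv, ih]
        constructor
        · rintro (hx | hx)
          · rcases (PySem.Set.mem_add s (k + j) x).mp hx with hx | rfl
            · exact Or.inl hx
            · exact Or.inr ⟨j, List.mem_cons_self .., hg, rfl, hv⟩
          · exact Or.inr (by obtain ⟨j', hj', hq⟩ := hx; exact ⟨j', List.mem_cons_of_mem _ hj', hq⟩)
        · rintro (hx | ⟨j', hj', hq, rfl, hnv⟩)
          · exact Or.inl ((PySem.Set.mem_add s (k + j) x).mpr (Or.inl hx))
          · rcases List.mem_cons.mp hj' with rfl | hj'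
            · exact Or.inl ((PySem.Set.mem_add s (k + j') (k + j')).mpr (Or.inr rfl))
            · exact Or.inr ⟨j', hj', hq, rfl, hnv⟩
    · rw [if_neg hg, ih]
      constructor
      · rintro (hx | hx)
        · exact Or.inl hx
        · exact Or.inr (by obtain ⟨j', hj', hq⟩ := hx; exact ⟨j', List.mem_cons_of_mem _ hj', hq⟩)
      · rintro (hx | ⟨j', hj', hq, rfl, hnv⟩)
        · exact Or.inl hx
        · rcases List.mem_cons.mp hj' with rfl | hj'
          · exact absurd ⟨hq.1, hq.2⟩ hg
          · exact Or.inr ⟨j', hj', hq, rfl, hnv⟩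

lemma mem_bfsStep (strs : List String) (t : String) (n : Int)
    (frontier visited : PySem.Set Int) (x : Int) :
    x ∈ bfsStep strs t n frontier visited ↔
      ∃ k ∈ frontier, ∃ j : Int, 1 ≤ j ∧ j ≤ 5 ∧ k + j ≤ n ∧ Wtest strs t k j = true ∧
        x = k + j ∧ x ∉ visited := by
  have main : ∀ (fr : List Int) (s : PySem.Set Int),
      x ∈ fr.foldl (fun nxt k =>
          (PySem.List.pyRange 1 6 1).foldl (fun nxt j =>
            if k + j ≤ n ∧ strs.contains (PySem.Str.slice t (some k) (some (k + j))) then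
              (if (k + j) ∈ visited then nxt else PySem.Set.add nxt (k + j))
            else nxt) nxt) s ↔
        x ∈ s ∨ ∃ k ∈ fr, ∃ j : Int, 1 ≤ j ∧ j ≤ 5 ∧ k + j ≤ n ∧ Wtest strs t k j = true ∧
          x = k + j ∧ x ∉ visited := by
    intro fr
    induction fr with
    | nil => intro s; simp
    | cons k fr ih =>
      intro s
      rw [List.foldl_cons, ih, mem_inner_fold]
      constructor
      · rintro ((hx | ⟨j, hj, hq, rfl, hnv⟩) | ⟨k', hk', hrest⟩)
        · exact Or.inl hx
        · refine Or.inr ⟨k, List.mem_cons_self .., j, ?_, ?_, hq.1, hq.2, rfl, hnv⟩ <;>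
            · have := PySem.List.mem_pyRange_one.mp hj; omega
        · exact Or.inr ⟨k', List.mem_cons_of_mem _ hk', hrest⟩
      · rintro (hx | ⟨k', hk', j, h1, h5, hn', hw, rfl, hnv⟩)
        · exact Or.inl (Or.inl hx)
        · rcases List.mem_cons.mp hk' with rfl | hk'
          · exact Or.inl (Or.inr ⟨j, PySem.List.mem_pyRange_one.mpr ⟨h1, by omega⟩,
              ⟨hn', hw⟩, rfl, hnv⟩)
          · exact Or.inr ⟨k', hk', j, h1, h5, hn', hw, rfl, hnv⟩
  rw [bfsStep, main]
  simp

-- the BFS invariant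
def Binv (strs : List String) (t : String) (r : Nat)
    (frontier visited : PySem.Set Int) : Prop :=
  (∀ x : Int, x ∈ frontier ↔
    Reach (Wtest strs t) (PySem.Str.len t) 0 x ∧ mu (Wtest strs t) (PySem.Str.len t) 0 x = r) ∧
  (∀ x : Int, x ∈ visited ↔
    Reach (Wtest strs t) (PySem.Str.len t) 0 x ∧ mu (Wtest strs t) (PySem.Str.len t) 0 x ≤ r)

lemma binv_step (strs : List String) (t : String) (r : Nat)
    (frontier visited : PySem.Set Int) (h : Binv strs t r frontier visited) :
    Binv strs t (r + 1) (bfsStep strs t (PySem.Str.len t) frontier visited)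
      (PySem.Set.union visited (bfsStep strs t (PySem.Str.len t) frontier visited)) := by
  obtain ⟨hf, hv⟩ := h
  have hfr : ∀ x : Int, x ∈ bfsStep strs t (PySem.Str.len t) frontier visited ↔
      Reach (Wtest strs t) (PySem.Str.len t) 0 x ∧
        mu (Wtest strs t) (PySem.Str.len t) 0 x = r + 1 := by
    intro x
    rw [mem_bfsStep]
    constructor
    · rintro ⟨k, hk, j, h1, h5, hn', hw, rfl, hnv⟩
      obtain ⟨hrk, hmuk⟩ := (hf k).mp hk
      have hch : Ch (Wtest strs t) (PySem.Str.len t) 0 (k + j) (r + 1) := by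
        have := ch_snoc (ch_mu hrk) h1 h5 hn' hw
        rwa [hmuk] at this
      have hrx : Reach (Wtest strs t) (PySem.Str.len t) 0 (k + j) := ⟨r + 1, hch⟩
      refine ⟨hrx, ?_⟩
      have hub := mu_le hch
      have hnle : ¬ (mu (Wtest strs t) (PySem.Str.len t) 0 (k + j) ≤ r) := by
        intro hle
        exact hnv ((hv (k + j)).mpr ⟨hrx, hle⟩)
      omega
    · rintro ⟨hrx, hmux⟩
      have hch : Ch (Wtest strs t) (PySem.Str.len t) 0 x (r + 1) := by
        have := ch_mu hrx; rwa [hmux] at this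
      obtain ⟨c, j, hc, h1, h5, hn', hw, rfl⟩ := ch_snoc_elim hch
      have hrc : Reach (Wtest strs t) (PySem.Str.len t) 0 c := ⟨r, hc⟩
      have hmuc : mu (Wtest strs t) (PySem.Str.len t) 0 c = r := by
        have hle : mu (Wtest strs t) (PySem.Str.len t) 0 c ≤ r := mu_le hc
        have : mu (Wtest strs t) (PySem.Str.len t) 0 (c + j) ≤
            mu (Wtest strs t) (PySem.Str.len t) 0 c + 1 :=
          mu_le (ch_snoc (ch_mu hrc) h1 h5 hn' hw)
        omega
      refine ⟨c, (hf c).mpr ⟨hrc, hmuc⟩, j, h1, h5, hn', hw, rfl, ?_⟩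
      intro hmem
      have := ((hv (c + j)).mp hmem).2
      omega
  refine ⟨hfr, ?_⟩
  intro x
  rw [PySem.Set.mem_union, hv, hfr]
  constructor
  · rintro (⟨hr, hle⟩ | ⟨hr, heq⟩)
    · exact ⟨hr, by omega⟩
    · exact ⟨hr, by omega⟩
  · rintro ⟨hr, hle⟩
    by_cases h : mu (Wtest strs t) (PySem.Str.len t) 0 x ≤ r
    · exact Or.inl ⟨hr, h⟩
    · exact Or.inr ⟨hr, by omega⟩

-- the BFS loop returns Ans, given enough fuel
lemma bfs_loop_eq (strs : List String) (t : String) :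
    ∀ (fuel : Nat) (r : Nat) (frontier visited : PySem.Set Int),
      Binv strs t r frontier visited →
      (Reach (Wtest strs t) (PySem.Str.len t) 0 (PySem.Str.len t) →
        r ≤ mu (Wtest strs t) (PySem.Str.len t) 0 (PySem.Str.len t)) →
      r + fuel = (PySem.Str.len t).toNat + 1 →
      bfsLoop strs t (PySem.Str.len t) fuel frontier visited (r : Int) =
        Ans (Wtest strs t) (PySem.Str.len t) := by
  intro fuel
  induction fuel with
  | zero =>
    intro r frontier visited _ hmin hfuel
    have hn0 : (0 : Int) ≤ PySem.Str.len t := by rw [PySem.Str.len_eq]; positivity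
    have hnr : ¬ Reach (Wtest strs t) (PySem.Str.len t) 0 (PySem.Str.len t) := by
      intro hr
      have h1 := hmin hr
      have h2 := (ch_le (ch_mu hr)).2
      omega
    rw [bfsLoop, Ans_neg hnr]
  | succ fuel ih =>
    intro r frontier visited hinv hmin hfuel
    rw [bfsLoop]
    by_cases hmem : PySem.Str.len t ∈ frontier
    · rw [if_pos hmem]
      obtain ⟨hr, hmu⟩ := (hinv.1 _).mp hmem
      rw [Ans_pos hr, hmu]
    · rw [if_neg hmem]
      have hnext : Reach (Wtest strs t) (PySem.Str.len t) 0 (PySem.Str.len t) →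
          r + 1 ≤ mu (Wtest strs t) (PySem.Str.len t) 0 (PySem.Str.len t) := by
        intro hr
        have h1 := hmin hr
        have hne : mu (Wtest strs t) (PySem.Str.len t) 0 (PySem.Str.len t) ≠ r := by
          intro heq
          exact hmem ((hinv.1 _).mpr ⟨hr, heq⟩)
        omega
      have := ih (r + 1) _ _ (binv_step strs t r frontier visited hinv) hnext (by omega)
      rw [show ((r : Int) + 1) = ((r + 1 : Nat) : Int) by push_cast; ring]
      exact this

-- B computes Ans
lemma solution_alt_eq (strs : List String) (t : String) :
    solution_alt strs t = Ans (Wtest strs t) (PySem.Str.len t) := by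
  have hn0 : (0 : Int) ≤ PySem.Str.len t := by rw [PySem.Str.len_eq]; positivity
  have hinit : Binv strs t 0 (PySem.Set.ofList [0]) (PySem.Set.ofList [0]) := by
    have hmem : ∀ x : Int, x ∈ PySem.Set.ofList ([0] : List Int) ↔ x = 0 := by
      intro x
      rw [PySem.Set.mem_ofList]
      simp
    have hchar : ∀ x : Int, x = 0 ↔
        Reach (Wtest strs t) (PySem.Str.len t) 0 x ∧
          mu (Wtest strs t) (PySem.Str.len t) 0 x = 0 := by
      intro x
      constructor
      · rintro rfl
        exact ⟨⟨0, Ch.refl 0⟩, mu_self _ _ _⟩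
      · rintro ⟨hr, hmu⟩
        have := ch_mu hr
        rw [hmu] at this
        exact (ch_zero this).symm
    exact ⟨fun x => (hmem x).trans (hchar x),
      fun x => (hmem x).trans ((hchar x).trans (by
        constructor
        · rintro ⟨hr, hmu⟩; exact ⟨hr, by omega⟩
        · rintro ⟨hr, hmu⟩; exact ⟨hr, by omega⟩))⟩
  have := bfs_loop_eq strs t ((PySem.Str.len t).toNat + 1) 0
    (PySem.Set.ofList [0]) (PySem.Set.ofList [0]) hinit (fun _ => Nat.zero_le _) (by omega)
  show bfsLoop strs t (PySem.Str.len t) (PySem.Str.len t + 1).toNat _ _ 0 = _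
  rw [show (PySem.Str.len t + 1).toNat = (PySem.Str.len t).toNat + 1 by omega]
  exact_mod_cast this

-- ===== VERDICT (by name: the statement is the Claim_ definition above) =====
theorem solution_spec : Claim_equal_solution := by
  intro strs t _ hpre
  show solution strs t = solution_alt strs t
  rw [solution_eq strs t hpre, solution_alt_eq strs t]
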